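-- pv_equiv track=rewrite | github.com/songjin321/volume_measure | src/visual_hull/imageProcess.py | findSecondLargeIndexWithMask
-- ===== SOURCE A (Python) =====
-- def findSecondLargeIndexWithMask(num_list,mask):
--     two_index = 0
--     one_index=0
--     one=num_list[0]
--     two = num_list[0]
--     get_num=0
--     for i in range(len(num_list)):
--         if mask[i]:
--             if get_num==0:
--                 one = num_list[i]
--                 one_index = i
--                 get_num = get_num+1
--             elif get_num == 1:
--                 two = num_list[i]
--                 two_index = i
--                 if two > one:
--                     one, two = two, one
--                     one_index, two_index = two_index, one_index
--                 get_num = get_num + 1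
--                 start_i=i+1;
--                 break
--     if get_num < 2: return 0,0, False
--     for i in range(start_i, len(num_list)):
--         if mask[i]:
--             if num_list[i] > one:
--                 two_index=one_index
--                 two=one
--                 one = num_list[i]
--                 one_index=i
--             elif num_list[i]>two:
--                     two = num_list[i]
--                     two_index = i
--             else:
--                 pass
--     return one_index,two_index, True
-- ===== SOURCE B (Python) =====
-- def findSecondLargeIndexWithMask(num_list, mask):
--     pairs = [(num_list[i], i) for i in range(len(num_list)) if mask[i]]
--     if len(pairs) < 2:
--         return 0, 0, False
--     pairs.sort(key=lambda p: (-p[0], p[1]))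
--     return pairs[0][1], pairs[1][1], True
-- ===== Notes on version B (the rewrite author's own statement) =====
-- stated objective: simpler
-- what changed: Replaces A's two hand-written scan loops (bootstrap of the first two masked elements with a swap, then a running top-two update) by collecting the masked (value, index) pairs once and sorting them by (-value, index), whose first two entries are the answer with the same tie-breaking.
import Mathlib
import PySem

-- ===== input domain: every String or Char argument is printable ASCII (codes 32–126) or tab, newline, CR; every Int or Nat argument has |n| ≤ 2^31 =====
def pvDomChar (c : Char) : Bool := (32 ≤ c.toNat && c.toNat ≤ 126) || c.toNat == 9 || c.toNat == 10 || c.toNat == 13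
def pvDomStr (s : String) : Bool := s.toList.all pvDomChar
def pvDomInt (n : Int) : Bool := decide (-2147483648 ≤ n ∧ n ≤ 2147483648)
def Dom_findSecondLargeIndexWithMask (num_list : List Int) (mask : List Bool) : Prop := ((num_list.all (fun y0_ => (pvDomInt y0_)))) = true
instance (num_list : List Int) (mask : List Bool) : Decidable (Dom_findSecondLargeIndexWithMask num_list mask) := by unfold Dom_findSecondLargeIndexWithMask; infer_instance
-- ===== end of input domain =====

-- B replaces A's two hand-written scan loops by collecting the masked (value, index) pairs
-- once and sorting them by (-value, index); objective: simpler.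

-- ===== PORT A =====
-- first Python loop of A: finds the first two masked entries (state one/one_index/two/two_index/get_num),
-- swapping so `one` holds the larger, and breaks returning start_i = i+1; returns (one, one_index, two, two_index, get_num, i)
def pvA_loop1 (num_list : List Int) (mask : List Bool) (i : Nat)
    (one : Int) (one_index : Nat) (two : Int) (two_index : Nat) (get_num : Nat) :
    Int × Nat × Int × Nat × Nat × Nat :=
  if _h : i < num_list.length then
    if mask.getD i false then
      if get_num == 0 then
        pvA_loop1 num_list mask (i+1) (num_list.getD i 0) i two two_index 1
      else
        -- get_num == 1 (the only other value the loop reaches)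
        let two' := num_list.getD i 0
        if two' > one then (two', i, one, one_index, 2, i+1)
        else (one, one_index, two', i, 2, i+1)
    else pvA_loop1 num_list mask (i+1) one one_index two two_index get_num
  else (one, one_index, two, two_index, get_num, i)
termination_by num_list.length - i

-- second Python loop of A: running top-two update from start_i
def pvA_loop2 (num_list : List Int) (mask : List Bool) (i : Nat)
    (one : Int) (one_index : Nat) (two : Int) (two_index : Nat) : Int × Nat × Int × Nat :=
  if _h : i < num_list.length then
    if mask.getD i false then
      let v := num_list.getD i 0
      if v > one then pvA_loop2 num_list mask (i+1) v i one one_index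
      else if v > two then pvA_loop2 num_list mask (i+1) one one_index v i
      else pvA_loop2 num_list mask (i+1) one one_index two two_index
    else pvA_loop2 num_list mask (i+1) one one_index two two_index
  else (one, one_index, two, two_index)
termination_by num_list.length - i

def findSecondLargeIndexWithMask (num_list : List Int) (mask : List Bool) : Int × Int × Bool :=
  let one := num_list.getD 0 0   -- Python's num_list[0]; Pre_ requires num_list ≠ []
  let r := pvA_loop1 num_list mask 0 one 0 one 0 0
  if r.2.2.2.2.1 < 2 then (0, 0, false)
  else
    let s := pvA_loop2 num_list mask r.2.2.2.2.2 r.1 r.2.1 r.2.2.1 r.2.2.2.1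
    ((s.2.1 : Int), (s.2.2.2 : Int), true)

-- ===== PORT B =====
def findSecondLargeIndexWithMask_alt (num_list : List Int) (mask : List Bool) : Int × Int × Bool :=
  let pairs := ((List.range num_list.length).filter (fun i => mask.getD i false)).map
      (fun i => (num_list.getD i 0, i))
  if pairs.length < 2 then (0, 0, false)
  else
    let s := PySem.List.sorted2 pairs (fun p => -p.1) (fun p => p.2)
    (((s.getD 0 (0, 0)).2 : Int), ((s.getD 1 (0, 0)).2 : Int), true)

-- ===== PRECONDITION & SPEC =====
-- Pre_ excludes exactly the inputs on which the Python A raises IndexError: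
-- an empty num_list (A evaluates num_list[0] first) and a mask shorter than num_list
-- (both loops index mask[i] for i up to len(num_list)-1).
def Pre_findSecondLargeIndexWithMask (num_list : List Int) (mask : List Bool) : Prop :=
  num_list ≠ [] ∧ num_list.length ≤ mask.length
instance (num_list : List Int) (mask : List Bool) : Decidable (Pre_findSecondLargeIndexWithMask num_list mask) := by unfold Pre_findSecondLargeIndexWithMask; infer_instance
def pvWitness_findSecondLargeIndexWithMask : List Int × List Bool := ([3, 1], [true, true])

def Spec_findSecondLargeIndexWithMask (num_list : List Int) (mask : List Bool) (out : Int × Int × Bool) : Prop := out = findSecondLargeIndexWithMask_alt num_list mask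
instance (num_list : List Int) (mask : List Bool) (out : Int × Int × Bool) : Decidable (Spec_findSecondLargeIndexWithMask num_list mask out) := by unfold Spec_findSecondLargeIndexWithMask; infer_instance

-- ===== CLAIM (what is proved, stated in full; the proofs are below) =====
def Claim_equal_findSecondLargeIndexWithMask : Prop := ∀ (num_list : List Int) (mask : List Bool), Dom_findSecondLargeIndexWithMask num_list mask → Pre_findSecondLargeIndexWithMask num_list mask → Spec_findSecondLargeIndexWithMask num_list mask (findSecondLargeIndexWithMask num_list mask)

-- ===== LEMMAS AND PROOFS =====

-- the list of masked (value, index) pairs from position i on, in index order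
def pvMasked (num_list : List Int) (mask : List Bool) (i : Nat) : List (Int × Nat) :=
  if _h : i < num_list.length then
    (if mask.getD i false then [(num_list.getD i 0, i)] else []) ++ pvMasked num_list mask (i+1)
  else []
termination_by num_list.length - i

-- the sort key of B, as one lexicographic key
def pvKey (p : Int × Nat) : Int ×ₗ Nat := toLex (-p.1, p.2)

-- A's running top-two update, on pairs
def pvStep (st : (Int × Nat) × (Int × Nat)) (p : Int × Nat) : (Int × Nat) × (Int × Nat) :=
  if p.1 > st.1.1 then (p, st.1)
  else if p.1 > st.2.1 then (st.1, p)
  else st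

-- (a, b) are the two key-smallest elements of l
def pvMin2 (l : List (Int × Nat)) (a b : Int × Nat) : Prop :=
  a ∈ l ∧ b ∈ l ∧ pvKey a < pvKey b ∧ ∀ c ∈ l, c ≠ a → c ≠ b → pvKey b < pvKey c

theorem pvKey_lt_iff (x y : Int × Nat) :
    pvKey x < pvKey y ↔ y.1 < x.1 ∨ (x.1 = y.1 ∧ x.2 < y.2) := by
  simp only [pvKey, Prod.Lex.toLex_lt_toLex]
  omega

theorem pvMin2_fst_min {l : List (Int × Nat)} {a b : Int × Nat} (h : pvMin2 l a b) :
    ∀ c ∈ l, c ≠ a → pvKey a < pvKey c := by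
  intro c hc hne
  by_cases hb : c = b
  · subst hb; exact h.2.2.1
  · exact lt_trans h.2.2.1 (h.2.2.2 c hc hne hb)

theorem pvMin2_unique {l : List (Int × Nat)} {a b a' b' : Int × Nat}
    (h : pvMin2 l a b) (h' : pvMin2 l a' b') : a = a' ∧ b = b' := by
  have ha : a = a' := by
    by_contra hne
    exact absurd (pvMin2_fst_min h a' h'.1 (fun e => hne e.symm)) (not_lt.mpr (le_of_lt (pvMin2_fst_min h' a h.1 hne)))
  subst ha
  have hb : b = b' := by
    have hb'a : b' ≠ a := fun e => absurd h'.2.2.1 (by rw [e]; exact lt_irrefl _)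
    have hba : b ≠ a := fun e => absurd h.2.2.1 (by rw [e]; exact lt_irrefl _)
    by_contra hne
    exact absurd (h.2.2.2 b' h'.2.1 hb'a (fun e => hne e.symm)) (not_lt.mpr (le_of_lt (h'.2.2.2 b h.2.1 hba hne)))
  exact ⟨rfl, hb⟩

theorem pvStep_min2 {base : List (Int × Nat)} {one two p : Int × Nat}
    (h : pvMin2 base one two) (hp : ∀ q ∈ base, q.2 < p.2) :
    pvMin2 (base ++ [p]) (pvStep (one, two) p).1 (pvStep (one, two) p).2 := by
  obtain ⟨h1, h2, hk, hrest⟩ := h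
  have hpo : one.2 < p.2 := hp one h1
  have hpt : two.2 < p.2 := hp two h2
  unfold pvStep
  by_cases hv1 : p.1 > one.1
  · simp only [hv1, if_pos]
    refine ⟨List.mem_append_right _ (List.mem_singleton.mpr rfl), List.mem_append_left _ h1, ?_, ?_⟩
    · rw [pvKey_lt_iff]; exact Or.inl hv1
    · intro c hc hcp hcone
      rcases List.mem_append.mp hc with hc | hc
      · by_cases hct : c = two
        · subst hct; exact hk
        · exact lt_trans hk (hrest c hc hcone hct)
      · exact absurd (List.mem_singleton.mp hc) hcp
  · simp only [hv1, if_neg, if_false]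
    by_cases hv2 : p.1 > two.1
    · simp only [hv2, if_pos]
      refine ⟨List.mem_append_left _ h1, List.mem_append_right _ (List.mem_singleton.mpr rfl), ?_, ?_⟩
      · rw [pvKey_lt_iff]; omega
      · intro c hc hcone hcp
        rcases List.mem_append.mp hc with hc | hc
        · by_cases hct : c = two
          · subst hct; rw [pvKey_lt_iff]; exact Or.inl hv2
          · exact lt_trans (by rw [pvKey_lt_iff]; exact Or.inl hv2) (hrest c hc hcone hct)
        · exact absurd (List.mem_singleton.mp hc) hcp
    · simp only [hv2, if_neg, if_false]
      refine ⟨List.mem_append_left _ h1, List.mem_append_left _ h2, hk, ?_⟩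
      intro c hc hcone hct
      rcases List.mem_append.mp hc with hc | hc
      · exact hrest c hc hcone hct
      · rw [List.mem_singleton.mp hc, pvKey_lt_iff]; omega

theorem pvFold_min2 : ∀ (rest base : List (Int × Nat)) (one two : Int × Nat),
    pvMin2 base one two →
    (∀ p ∈ rest, ∀ q ∈ base, q.2 < p.2) →
    rest.Pairwise (fun p q => p.2 < q.2) →
    pvMin2 (base ++ rest) (rest.foldl pvStep (one, two)).1 (rest.foldl pvStep (one, two)).2
  | [], base, one, two, h, _, _ => by simpa using h
  | p :: rest, base, one, two, h, hlt, hpw => by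
    obtain ⟨hph, hpw'⟩ := List.pairwise_cons.mp hpw
    have hstep := pvStep_min2 h (fun q hq => hlt p (List.mem_cons_self) q hq)
    have hih := pvFold_min2 rest (base ++ [p]) (pvStep (one, two) p).1 (pvStep (one, two) p).2
      hstep
      (by
        intro r hr q hq
        rcases List.mem_append.mp hq with hq | hq
        · exact hlt r (List.mem_cons_of_mem _ hr) q hq
        · rw [List.mem_singleton.mp hq]; exact hph r hr)
      hpw'
    simpa [List.foldl_cons, List.append_assoc] using hih

-- B's two-key sort is the one-key sort by pvKey
theorem pvSorted2_eq_sorted (l : List (Int × Nat)) :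
    PySem.List.sorted2 l (fun p => -p.1) (fun p => p.2) = PySem.List.sorted l pvKey := by
  have hbef : (fun (a b : Int × Nat) =>
        (decide (-a.1 < -b.1) || (!decide (-b.1 < -a.1) && decide (a.2 < b.2)))) =
      fun a b => decide (pvKey a < pvKey b) := by
    funext a b
    rw [Bool.eq_iff_iff]
    simp only [Bool.or_eq_true, Bool.and_eq_true, Bool.not_eq_true', decide_eq_true_eq,
      decide_eq_false_iff_not, pvKey, Prod.Lex.toLex_lt_toLex]
    omega
  simp only [PySem.List.sorted2, PySem.List.sorted, hbef]
  simp

theorem pvKey_injective : Function.Injective pvKey := by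
  intro x y hxy
  simp only [pvKey] at hxy
  have h := toLex.injective hxy
  rw [Prod.mk.injEq] at h
  obtain ⟨h1, h2⟩ := h
  exact Prod.ext (by omega) h2

theorem pvSorted_min2 (l : List (Int × Nat)) (hpw : l.Pairwise (fun p q => p.2 < q.2))
    {a b : Int × Nat} {t : List (Int × Nat)}
    (hs : PySem.List.sorted l pvKey = a :: b :: t) : pvMin2 l a b := by
  have hperm := PySem.List.sorted_perm l pvKey false
  have hle := PySem.List.sorted_pairwise l pvKey
  have hnd : l.Nodup := hpw.imp (fun {p q} hlt heq => absurd hlt (by rw [heq]; exact lt_irrefl _))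
  have hnds : (PySem.List.sorted l pvKey).Nodup := hperm.nodup_iff.mpr hnd
  have hlt : (PySem.List.sorted l pvKey).Pairwise (fun x y => pvKey x < pvKey y) :=
    (hle.and hnds).imp (fun hc => lt_of_le_of_ne hc.1 (fun hk => hc.2 (pvKey_injective hk)))
  rw [hs] at hlt hperm
  obtain ⟨ha1, hrel⟩ := List.pairwise_cons.mp hlt
  obtain ⟨hb1, _⟩ := List.pairwise_cons.mp hrel
  refine ⟨hperm.subset (List.mem_cons_self), hperm.subset (List.mem_cons_of_mem _ List.mem_cons_self), ha1 b (List.mem_cons_self), ?_⟩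
  intro c hc hca hcb
  have hc2 : c ∈ a :: b :: t := hperm.mem_iff.mpr hc
  rcases List.mem_cons.mp hc2 with hc' | hc2'
  · exact absurd hc' hca
  · rcases List.mem_cons.mp hc2' with hc' | hc'
    · exact absurd hc' hcb
    · exact hb1 c hc'

-- pvMasked as filtered range
theorem pvMasked_eq (num_list : List Int) (mask : List Bool) (i : Nat) :
    pvMasked num_list mask i =
      ((List.range' i (num_list.length - i)).filter (fun j => mask.getD j false)).map
        (fun j => (num_list.getD j 0, j)) := by
  rw [pvMasked]
  split
  · next h =>
    have hn : num_list.length - i = (num_list.length - (i+1)) + 1 := by omega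
    rw [hn, List.range'_succ, pvMasked_eq num_list mask (i+1)]
    by_cases hm : mask.getD i false <;> simp [← List.getD_eq_getElem?_getD, hm, List.filter_cons]
  · next h =>
    have hn : num_list.length - i = 0 := by omega
    simp [hn]
termination_by num_list.length - i

theorem pvPairs_eq (num_list : List Int) (mask : List Bool) :
    ((List.range num_list.length).filter (fun i => mask.getD i false)).map
      (fun i => (num_list.getD i 0, i)) = pvMasked num_list mask 0 := by
  rw [pvMasked_eq, List.range_eq_range', Nat.sub_zero]

theorem pvMasked_pairwise (num_list : List Int) (mask : List Bool) :
    (pvMasked num_list mask 0).Pairwise (fun p q => p.2 < q.2) := by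
  rw [pvMasked_eq]
  rw [List.pairwise_map]
  exact List.Pairwise.filter _ (List.pairwise_lt_range' 1)

-- loop2 is a fold of pvStep over pvMasked
theorem pvLoop2_eq (num_list : List Int) (mask : List Bool) (i : Nat)
    (one : Int) (oi : Nat) (two : Int) (ti : Nat) :
    pvA_loop2 num_list mask i one oi two ti =
      (((pvMasked num_list mask i).foldl pvStep ((one, oi), (two, ti))).1.1,
       ((pvMasked num_list mask i).foldl pvStep ((one, oi), (two, ti))).1.2,
       ((pvMasked num_list mask i).foldl pvStep ((one, oi), (two, ti))).2.1,
       ((pvMasked num_list mask i).foldl pvStep ((one, oi), (two, ti))).2.2) := by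
  rw [pvA_loop2, pvMasked]
  split
  · next h =>
    by_cases hm : mask.getD i false
    · simp only [hm, if_true, List.singleton_append, List.foldl_cons]
      by_cases h1 : num_list.getD i 0 > one
      · have h1' : one < num_list[i]?.getD 0 := h1
        rw [if_pos h1, pvLoop2_eq num_list mask (i+1)]
        simp [pvStep, h1']
      · have h1' : ¬ one < num_list[i]?.getD 0 := h1
        rw [if_neg h1]
        by_cases h2 : num_list.getD i 0 > two
        · have h2' : two < num_list[i]?.getD 0 := h2
          rw [if_pos h2, pvLoop2_eq num_list mask (i+1)]
          simp [pvStep, h1', h2']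
        · have h2' : ¬ two < num_list[i]?.getD 0 := h2
          rw [if_neg h2, pvLoop2_eq num_list mask (i+1)]
          simp [pvStep, h1', h2']
    · simp only [hm, if_false, List.nil_append]
      exact pvLoop2_eq num_list mask (i+1) one oi two ti
  · simp
termination_by num_list.length - i

-- loop1 when no masked entry remains: get_num is unchanged
theorem pvLoop1_nil (num_list : List Int) (mask : List Bool) (i : Nat)
    (one : Int) (oi : Nat) (two : Int) (ti : Nat) (g : Nat)
    (h : pvMasked num_list mask i = []) :
    (pvA_loop1 num_list mask i one oi two ti g).2.2.2.2.1 = g := by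
  rw [pvA_loop1]
  rw [pvMasked] at h
  split
  · next hlt =>
    rw [dif_pos hlt] at h
    by_cases hm : mask.getD i false
    · rw [if_pos hm] at h; simp at h
    · rw [if_neg hm] at h
      rw [List.nil_append] at h
      rw [if_neg hm]
      exact pvLoop1_nil num_list mask (i+1) one oi two ti g h
  · rfl
termination_by num_list.length - i

-- loop1 with get_num = 0 consumes the first masked pair
theorem pvLoop1_cons0 (num_list : List Int) (mask : List Bool) (i : Nat)
    (one : Int) (oi : Nat) (two : Int) (ti : Nat)
    {p : Int × Nat} {rest : List (Int × Nat)}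
    (h : pvMasked num_list mask i = p :: rest) :
    pvA_loop1 num_list mask i one oi two ti 0 =
      pvA_loop1 num_list mask (p.2+1) p.1 p.2 two ti 1 ∧
    pvMasked num_list mask (p.2+1) = rest := by
  rw [pvA_loop1]
  rw [pvMasked] at h
  split
  · next hlt =>
    rw [dif_pos hlt] at h
    by_cases hm : mask.getD i false
    · rw [if_pos hm, List.singleton_append] at h
      rw [List.cons.injEq] at h
      obtain ⟨hp, hrest⟩ := h
      subst hp
      rw [if_pos hm]
      exact ⟨rfl, hrest⟩
    · rw [if_neg hm, List.nil_append] at h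
      rw [if_neg hm]
      exact pvLoop1_cons0 num_list mask (i+1) one oi two ti h
  · next hlt =>
    rw [dif_neg hlt] at h
    exact absurd h (List.cons_ne_nil p rest).symm
termination_by num_list.length - i

-- loop1 with get_num = 1 consumes the next masked pair and breaks
theorem pvLoop1_cons1 (num_list : List Int) (mask : List Bool) (i : Nat)
    (one : Int) (oi : Nat) (two : Int) (ti : Nat)
    {p : Int × Nat} {rest : List (Int × Nat)}
    (h : pvMasked num_list mask i = p :: rest) :
    pvA_loop1 num_list mask i one oi two ti 1 =
      (if p.1 > one then (p.1, p.2, one, oi, 2, p.2+1) else (one, oi, p.1, p.2, 2, p.2+1)) ∧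
    pvMasked num_list mask (p.2+1) = rest := by
  rw [pvA_loop1]
  rw [pvMasked] at h
  split
  · next hlt =>
    rw [dif_pos hlt] at h
    by_cases hm : mask.getD i false
    · rw [if_pos hm, List.singleton_append] at h
      rw [List.cons.injEq] at h
      obtain ⟨hp, hrest⟩ := h
      subst hp
      rw [if_pos hm]
      refine ⟨?_, hrest⟩
      by_cases hv : num_list.getD i 0 > one <;> simp [hv]
    · rw [if_neg hm, List.nil_append] at h
      rw [if_neg hm]
      exact pvLoop1_cons1 num_list mask (i+1) one oi two ti h
  · next hlt =>
    rw [dif_neg hlt] at h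
    exact absurd h (List.cons_ne_nil p rest).symm
termination_by num_list.length - i

-- the main equivalence, by case analysis on the masked pairs
theorem pvMain (num_list : List Int) (mask : List Bool) :
    findSecondLargeIndexWithMask num_list mask = findSecondLargeIndexWithMask_alt num_list mask := by
  simp only [findSecondLargeIndexWithMask, findSecondLargeIndexWithMask_alt]
  rw [pvPairs_eq]
  have hpw := pvMasked_pairwise num_list mask
  cases hM : pvMasked num_list mask 0 with
  | nil =>
    have hg := pvLoop1_nil num_list mask 0 (num_list.getD 0 0) 0 (num_list.getD 0 0) 0 0 hM
    rw [if_pos (by rw [hg]; norm_num), if_pos (by simp)]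
  | cons p0 tl =>
    cases tl with
    | nil =>
      obtain ⟨hstep, hrest⟩ := pvLoop1_cons0 num_list mask 0 (num_list.getD 0 0) 0 (num_list.getD 0 0) 0 hM
      have hg := pvLoop1_nil num_list mask (p0.2+1) p0.1 p0.2 (num_list.getD 0 0) 0 1 hrest
      rw [hstep]
      rw [if_pos (by rw [hg]; norm_num), if_pos (by simp)]
    | cons p1 rest =>
      rw [hM] at hpw
      obtain ⟨hph0, hpw1⟩ := List.pairwise_cons.mp hpw
      obtain ⟨hph1, hpwr⟩ := List.pairwise_cons.mp hpw1
      have h01 : p0.2 < p1.2 := hph0 p1 (List.mem_cons_self)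
      obtain ⟨hstep0, hrest0⟩ := pvLoop1_cons0 num_list mask 0 (num_list.getD 0 0) 0 (num_list.getD 0 0) 0 hM
      obtain ⟨hstep1, hrest1⟩ := pvLoop1_cons1 num_list mask (p0.2+1) p0.1 p0.2 (num_list.getD 0 0) 0 hrest0
      rw [hstep0, hstep1]
      have hbase : ∀ r ∈ rest, ∀ q ∈ [p0, p1], q.2 < r.2 := by
        intro r hr q hq
        rcases List.mem_cons.mp hq with hq | hq
        · exact hq ▸ hph0 r (List.mem_cons_of_mem _ hr)
        · rcases List.mem_cons.mp hq with hq | hq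
          · exact hq ▸ hph1 r hr
          · exact absurd hq List.not_mem_nil
      -- B's sorted list
      have hlen : (PySem.List.sorted (p0 :: p1 :: rest) pvKey).length = rest.length + 2 := by
        rw [PySem.List.length_sorted]; simp
      obtain ⟨a, b, t, hs⟩ : ∃ a b t, PySem.List.sorted (p0 :: p1 :: rest) pvKey = a :: b :: t := by
        cases hs0 : PySem.List.sorted (p0 :: p1 :: rest) pvKey with
        | nil => rw [hs0] at hlen; simp at hlen
        | cons a tl0 =>
          cases tl0 with
          | nil => rw [hs0] at hlen; simp at hlen
          | cons b t => exact ⟨a, b, t, rfl⟩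
      have hBmin := pvSorted_min2 (p0 :: p1 :: rest) hpw hs
      have hlen2 : ¬ (p0 :: p1 :: rest).length < 2 := by simp
      by_cases hsw : p1.1 > p0.1
      · rw [if_pos hsw]
        have hinit : pvMin2 [p0, p1] p1 p0 := by
          refine ⟨by simp, by simp, by rw [pvKey_lt_iff]; exact Or.inl hsw, ?_⟩
          intro c hc hc1 hc0
          rcases List.mem_cons.mp hc with hc | hc
          · exact absurd hc hc0
          · rcases List.mem_cons.mp hc with hc | hc
            · exact absurd hc hc1
            · exact absurd hc List.not_mem_nil
        have hfold := pvFold_min2 rest [p0, p1] p1 p0 hinit hbase hpwr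
        have huniq := pvMin2_unique hfold hBmin
        have h2lt : ¬ ((p1.1, p1.2, p0.1, p0.2, 2, p1.2+1) :
            Int × Nat × Int × Nat × Nat × Nat).2.2.2.2.1 < 2 := by norm_num
        rw [if_neg h2lt, pvLoop2_eq, if_neg hlen2, pvSorted2_eq_sorted, hs]
        simp only [hrest1]
        simp [← huniq.1, ← huniq.2]
      · rw [if_neg hsw]
        have hinit : pvMin2 [p0, p1] p0 p1 := by
          refine ⟨by simp, by simp, by rw [pvKey_lt_iff]; omega, ?_⟩
          intro c hc hc0 hc1
          rcases List.mem_cons.mp hc with hc | hc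
          · exact absurd hc hc0
          · rcases List.mem_cons.mp hc with hc | hc
            · exact absurd hc hc1
            · exact absurd hc List.not_mem_nil
        have hfold := pvFold_min2 rest [p0, p1] p0 p1 hinit hbase hpwr
        have huniq := pvMin2_unique hfold hBmin
        have h2lt : ¬ ((p0.1, p0.2, p1.1, p1.2, 2, p1.2+1) :
            Int × Nat × Int × Nat × Nat × Nat).2.2.2.2.1 < 2 := by norm_num
        rw [if_neg h2lt, pvLoop2_eq, if_neg hlen2, pvSorted2_eq_sorted, hs]
        simp only [hrest1]
        simp [← huniq.1, ← huniq.2]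

-- ===== VERDICT (by name: the statement is the Claim_ definition above) =====
theorem findSecondLargeIndexWithMask_spec : Claim_equal_findSecondLargeIndexWithMask := by
  intro num_list mask _ _
  unfold Spec_findSecondLargeIndexWithMask
  exact pvMain num_list mask
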